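-- pv_equiv track=rewrite | github.com/rohanvinaik/TailChasingFixer | tailchasing/fixers/loop_extrusion.py | _suggest_shared_module_name
-- ===== SOURCE A (Python) =====
-- from typing import Dict, List, Set, Tuple, Optional
--
-- def _suggest_shared_module_name(modules: List[str]) -> str:
--     """Suggest name for shared module based on modules in SCC."""
--     # Find common prefix
--     if not modules:
--         return "shared"
--
--     parts = modules[0].split('.')
--     for module in modules[1:]:
--         module_parts = module.split('.')
--         new_parts = []
--         for p1, p2 in zip(parts, module_parts):
--             if p1 == p2:
--                 new_parts.append(p1)
--             else:
--                 break
--         parts = new_parts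
--
--     if parts:
--         return '.'.join(parts) + '_shared'
--     else:
--         return 'shared'
-- ===== SOURCE B (Python) =====
-- def _suggest_shared_module_name(modules):
--     """Suggest name for shared module based on modules in SCC."""
--     if not modules:
--         return "shared"
--     part_lists = [m.split('.') for m in modules]
--     prefix = []
--     for column in zip(*part_lists):
--         if all(p == column[0] for p in column):
--             prefix.append(column[0])
--         else:
--             break
--     if prefix:
--         return '.'.join(prefix) + '_shared'
--     return 'shared'
-- ===== Notes on version B (the rewrite author's own statement) =====
-- stated objective: alternative
-- what changed: B splits every module once and scans column-by-column over zip(*part_lists), appending a part when a whole column agrees, instead of A's pairwise fold that recomputes a shrinking common-prefix list against each subsequent module.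
import Mathlib
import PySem

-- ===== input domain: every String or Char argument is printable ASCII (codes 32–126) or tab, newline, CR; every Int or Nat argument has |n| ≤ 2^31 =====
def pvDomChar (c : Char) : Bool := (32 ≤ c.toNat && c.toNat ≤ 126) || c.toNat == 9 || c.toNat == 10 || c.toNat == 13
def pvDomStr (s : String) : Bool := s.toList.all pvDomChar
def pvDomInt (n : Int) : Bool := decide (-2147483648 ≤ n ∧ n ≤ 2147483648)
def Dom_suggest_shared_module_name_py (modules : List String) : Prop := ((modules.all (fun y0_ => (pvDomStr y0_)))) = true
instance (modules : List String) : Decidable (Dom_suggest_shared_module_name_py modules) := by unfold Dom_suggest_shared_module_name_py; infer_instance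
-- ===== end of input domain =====

-- B computes the common dotted prefix column-by-column over all split modules at once,
-- instead of A's pairwise fold of shrinking prefixes (objective: alternative decomposition).


-- ===== PORT A =====
-- m.split('.') with the nonempty literal separator '.': split? is always `some` here
def pvSplitDot (m : String) : List String := (PySem.Str.split? m ".").getD []

-- inner loop of A: 'for p1, p2 in zip(parts, module_parts): if p1 == p2: append p1 else: break'
def pvCommonA (parts mparts : List String) : List String :=
  match parts, mparts with
  | p1 :: t1, p2 :: t2 => if p1 == p2 then p1 :: pvCommonA t1 t2 else []
  | _, _ => []

def suggest_shared_module_name_py (modules : List String) : String :=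
  match modules with
  | [] => "shared"
  | m0 :: rest =>
    let parts := rest.foldl (fun parts m => pvCommonA parts (pvSplitDot m)) (pvSplitDot m0)
    if parts.isEmpty then "shared" else PySem.Str.join "." parts ++ "_shared"

-- ===== PORT B =====
-- 'for column in zip(*part_lists): if all equal: append column[0] else: break',
-- with the first part-list separated out so the recursion is structural on it.
def pvPrefixCols (first : List String) (rest : List (List String)) : List String :=
  match first with
  | [] => []
  | p :: t =>
    if rest.all (fun l => !l.isEmpty) then
      if (rest.map (fun l => l.headD "")).all (fun q => q == p) then
        p :: pvPrefixCols t (rest.map List.tail)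
      else []
    else []

def suggest_shared_module_name_py_alt (modules : List String) : String :=
  match modules with
  | [] => "shared"
  | m0 :: rest =>
    let pre := pvPrefixCols (pvSplitDot m0) (rest.map (fun m => pvSplitDot m))
    if pre.isEmpty then "shared" else PySem.Str.join "." pre ++ "_shared"

-- ===== PRECONDITION & SPEC =====
def Spec_suggest_shared_module_name_py (modules : List String) (out : String) : Prop := out = suggest_shared_module_name_py_alt modules
instance (modules : List String) (out : String) : Decidable (Spec_suggest_shared_module_name_py modules out) := by unfold Spec_suggest_shared_module_name_py; infer_instance

-- ===== CLAIM (what is proved, stated in full; the proofs are below) =====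
def Claim_equal_suggest_shared_module_name_py : Prop := ∀ (modules : List String), Dom_suggest_shared_module_name_py modules → Spec_suggest_shared_module_name_py modules (suggest_shared_module_name_py modules)

-- ===== LEMMAS AND PROOFS =====

-- one column step of B equals folding one module into A's prefix
theorem pvPrefixCols_cons (f l : List String) (ls : List (List String)) :
    pvPrefixCols f (l :: ls) = pvPrefixCols (pvCommonA f l) ls := by
  induction f generalizing l ls with
  | nil => simp [pvPrefixCols, pvCommonA]
  | cons p t ih =>
    cases l with
    | nil => simp [pvPrefixCols, pvCommonA]
    | cons q lt =>
      by_cases h : p = q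
      · subst h
        simp only [pvPrefixCols, pvCommonA, List.all_cons, List.map_cons, List.tail_cons,
          List.isEmpty_cons, Bool.not_false, Bool.true_and, List.headD_cons, beq_self_eq_true,
          if_true, ih]
      · simp [pvPrefixCols, pvCommonA, h, Ne.symm h]

theorem pvPrefixCols_nil (f : List String) : pvPrefixCols f [] = f := by
  induction f with
  | nil => rfl
  | cons p t ih => simp [pvPrefixCols, ih]

theorem pvPrefixCols_eq_foldl (ls : List (List String)) (f : List String) :
    pvPrefixCols f ls = ls.foldl pvCommonA f := by
  induction ls generalizing f with
  | nil => exact pvPrefixCols_nil f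
  | cons l ls ih => rw [pvPrefixCols_cons, List.foldl_cons, ih]

-- ===== VERDICT (by name: the statement is the Claim_ definition above) =====
theorem suggest_shared_module_name_py_spec : Claim_equal_suggest_shared_module_name_py := by
  unfold Claim_equal_suggest_shared_module_name_py
  intro modules _
  unfold Spec_suggest_shared_module_name_py suggest_shared_module_name_py suggest_shared_module_name_py_alt
  cases modules with
  | nil => rfl
  | cons m0 rest =>
    simp only [pvPrefixCols_eq_foldl, List.foldl_map]
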